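-- pv_equiv track=rewrite | github.com/mr-ahtashamulhaq/python_repo | Data Structure and Algorithm/Problem_234_Ninja's Training.py | maximumPoints_tabuSapceOpt
-- ===== SOURCE A (Python) =====
-- def maximumPoints_tabuSapceOpt(arr):
--     prev = [-1, -1, -1, -1]
--     n = len(arr)
--     prev[0] = max(arr[0][1], arr[0][2])
--     prev[1] = max(arr[0][0], arr[0][2])
--     prev[2] = max(arr[0][0], arr[0][1])
--     prev[3] = max(arr[0][0], arr[0][1], arr[0][2])
--
--     for index in range(1, n):
--         curr = [0, 0, 0, 0]
--         for last in range(0, 4):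
--
--             maxi = 0
--             for i in range(0, 3):
--                 if i != last:
--                     maxi = max(maxi, arr[index][i] + prev[i])
--
--             curr[last] = maxi
--         prev = curr.copy()
--
--     return prev[3]
-- ===== SOURCE B (Python) =====
-- def maximumPoints_tabuSapceOpt(arr):
--     # Top-down memoized recursion f(day, last) = best points for days 0..day when
--     # activity `last` is forbidden on day `day` (last == 3: nothing forbidden).
--     # Driven by an explicit DFS stack so deep inputs never hit the recursion limit.
--     n = len(arr)
--     # base of the recursion: day 0 (unfloored)
--     memo = {(0, last): max(arr[0][k] for k in range(3) if k != last)
--             for last in range(4)}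
--     stack = [(n - 1, 3)]
--     while stack:
--         day, last = stack[-1]
--         if (day, last) in memo:
--             stack.pop()
--             continue
--         pending = [(day - 1, i) for i in range(3)
--                    if i != last and (day - 1, i) not in memo]
--         if pending:
--             stack.extend(pending)
--         else:
--             memo[(day, last)] = max(0, max(arr[day][i] + memo[(day - 1, i)]
--                                            for i in range(3) if i != last))
--             stack.pop()
--     return memo[(n - 1, 3)]
-- ===== Notes on version B (the rewrite author's own statement) =====
-- stated objective: alternative
-- what changed: Replaces A's bottom-up forward tabulation (rolling 4-slot array rebuilt day by day with nested index loops) by a top-down memoized recursion f(day, last) over (day, forbidden-activity) states, driven demand-first from the goal state (n-1, 3) with an explicit DFS stack and a dict memo instead of Python call recursion.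
import Mathlib
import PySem

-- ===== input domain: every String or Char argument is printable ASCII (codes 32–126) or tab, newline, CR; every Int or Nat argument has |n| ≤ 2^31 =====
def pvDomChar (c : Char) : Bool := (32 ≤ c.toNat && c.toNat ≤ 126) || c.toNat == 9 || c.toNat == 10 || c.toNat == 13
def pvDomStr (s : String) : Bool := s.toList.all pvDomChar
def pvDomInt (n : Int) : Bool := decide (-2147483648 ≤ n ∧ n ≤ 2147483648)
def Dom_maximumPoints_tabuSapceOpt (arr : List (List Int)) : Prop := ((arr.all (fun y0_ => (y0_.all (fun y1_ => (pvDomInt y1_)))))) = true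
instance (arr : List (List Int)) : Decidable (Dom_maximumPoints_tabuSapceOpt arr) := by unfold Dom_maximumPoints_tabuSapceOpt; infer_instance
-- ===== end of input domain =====

-- B replaces A's bottom-up forward tabulation by a top-down memoized recursion over
-- (day, forbidden-activity) states, driven from the goal state by an explicit DFS stack
-- with a dict memo (objective: alternative).

-- ===== PORT A =====
-- arr[index][i] with default 0: in range under Pre_ (every access is in range there)
def pvAt (r : List Int) (i : Int) : Int := PySem.List.pyGetD r i 0

-- one iteration of A's outer loop: builds curr[0..3] with the inner loops, returns curr
def pvAstep (prev : List Int) (row : List Int) : List Int :=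
  (PySem.List.pyRange 0 4 1).foldl (fun curr last =>
    let maxi := (PySem.List.pyRange 0 3 1).foldl (fun maxi i =>
      if i ≠ last then max maxi (pvAt row i + PySem.List.pyGetD prev i 0) else maxi) 0
    PySem.List.pySetD curr last maxi) [0, 0, 0, 0]

def maximumPoints_tabuSapceOpt (arr : List (List Int)) : Int :=
  let prev0 : List Int := [-1, -1, -1, -1]
  let n := PySem.List.len arr
  let r0 := PySem.List.pyGetD arr 0 []
  let prev1 := PySem.List.pySetD prev0 0 (max (pvAt r0 1) (pvAt r0 2))
  let prev2 := PySem.List.pySetD prev1 1 (max (pvAt r0 0) (pvAt r0 2))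
  let prev3 := PySem.List.pySetD prev2 2 (max (pvAt r0 0) (pvAt r0 1))
  let prev4 := PySem.List.pySetD prev3 3 (max (max (pvAt r0 0) (pvAt r0 1)) (pvAt r0 2))
  let prev := (PySem.List.pyRange 1 n 1).foldl
    (fun prev index => pvAstep prev (PySem.List.pyGetD arr index [])) prev4
  PySem.List.pyGetD prev 3 0

-- ===== PORT B =====
-- max(xs) of a nonempty iterable (the .getD default is never used on nonempty lists)
def pvMax (xs : List Int) : Int := (PySem.List.max? xs (fun y => y)).getD 0

-- max(arr[0][k] for k in range(3) if k != last): the generator always has ≥ 2 elements,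
-- so max?'s default is never used
def pvBase (arr : List (List Int)) (last : Int) : Int :=
  pvMax (((PySem.List.pyRange 0 3 1).filter (fun k => k != last)).map
      (fun k => pvAt (PySem.List.pyGetD arr 0 []) k))

-- the dict-comprehension seeding memo with the day-0 base values
def pvSeed (arr : List (List Int)) : PySem.Dict (Int × Int) Int :=
  (PySem.List.pyRange 0 4 1).foldl
    (fun m last => m.insert (0, last) (pvBase arr last)) PySem.Dict.empty

-- pending = [(day-1, i) for i in range(3) if i != last and (day-1, i) not in memo]
def pvPending (memo : PySem.Dict (Int × Int) Int) (day last : Int) : List (Int × Int) :=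
  ((PySem.List.pyRange 0 3 1).filter
      (fun i => i != last && !(memo.contains (day - 1, i)))).map (fun i => (day - 1, i))

-- max(0, max(arr[day][i] + memo[(day-1, i)] for i in range(3) if i != last)); the memo
-- entries are present whenever this branch runs (proved below), so getD's default is unused
def pvValue (arr : List (List Int)) (memo : PySem.Dict (Int × Int) Int) (day last : Int) : Int :=
  max 0 (pvMax (((PySem.List.pyRange 0 3 1).filter (fun i => i != last)).map
      (fun i => pvAt (PySem.List.pyGetD arr day []) i + memo.getD (day - 1, i) 0)))

-- the while loop; head of the list = top of the Python stack, so stack.extend(pending)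
-- pushes pending.reverse in front. fuel only makes the loop total: the proof shows the
-- loop finishes (stack empty) within the fuel supplied below.
def pvLoop (arr : List (List Int)) :
    Nat → List (Int × Int) → PySem.Dict (Int × Int) Int → PySem.Dict (Int × Int) Int
  | 0, _, memo => memo
  | _ + 1, [], memo => memo
  | fuel + 1, (day, last) :: rest, memo =>
    if memo.contains (day, last) then pvLoop arr fuel rest memo
    else
      let pending := pvPending memo day last
      if pending.isEmpty = false then
        pvLoop arr fuel (pending.reverse ++ (day, last) :: rest) memo
      else
        pvLoop arr fuel rest (memo.insert (day, last) (pvValue arr memo day last))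

def maximumPoints_tabuSapceOpt_alt (arr : List (List Int)) : Int :=
  let n : Int := PySem.List.len arr
  let memo := pvSeed arr
  let memo := pvLoop arr (5 ^ (arr.length + 1)) [(n - 1, 3)] memo
  -- memo[(n-1, 3)]: present when the loop ends under Pre_ (proved below), KeyError excluded by Pre_
  memo.getD (n - 1, 3) 0

-- ===== PRECONDITION & SPEC =====
-- Pre_ excludes exactly the inputs where A raises IndexError: the empty list and lists
-- with a row of fewer than 3 entries.
def Pre_maximumPoints_tabuSapceOpt (arr : List (List Int)) : Prop :=
  arr ≠ [] ∧ ∀ r ∈ arr, 3 ≤ r.length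
instance (arr : List (List Int)) : Decidable (Pre_maximumPoints_tabuSapceOpt arr) := by
  unfold Pre_maximumPoints_tabuSapceOpt; infer_instance

def pvWitness_maximumPoints_tabuSapceOpt : List (List Int) := [[1, 2, 3], [4, -5, 6]]

def Spec_maximumPoints_tabuSapceOpt (arr : List (List Int)) (out : Int) : Prop := out = maximumPoints_tabuSapceOpt_alt arr
instance (arr : List (List Int)) (out : Int) : Decidable (Spec_maximumPoints_tabuSapceOpt arr out) := by unfold Spec_maximumPoints_tabuSapceOpt; infer_instance

-- ===== CLAIM (what is proved, stated in full; the proofs are below) =====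
def Claim_equal_maximumPoints_tabuSapceOpt : Prop := ∀ (arr : List (List Int)), Dom_maximumPoints_tabuSapceOpt arr → Pre_maximumPoints_tabuSapceOpt arr → Spec_maximumPoints_tabuSapceOpt arr (maximumPoints_tabuSapceOpt arr)

-- ===== LEMMAS AND PROOFS =====

-- the shared recurrence both programs compute: f(day, last), day 0 unfloored
def pvF (arr : List (List Int)) : Nat → Int → Int
  | 0, last => pvBase arr last
  | d + 1, last =>
    max 0 (pvMax (((PySem.List.pyRange 0 3 1).filter (fun i => i != last)).map
        (fun i => pvAt (PySem.List.pyGetD arr ((d : Int) + 1) []) i + pvF arr d i)))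

-- every memo entry is a correct pvF value at a day inside the array
def pvGood (arr : List (List Int)) (m : PySem.Dict (Int × Int) Int) : Prop :=
  ∀ (d l v : Int), m.get? (d, l) = some v →
    ∃ dn : Nat, d = (dn : Int) ∧ dn < arr.length ∧ v = pvF arr dn l

-- the day-0 states are memoized
def pvSeeded (m : PySem.Dict (Int × Int) Int) : Prop :=
  ∀ l : Int, 0 ≤ l → l < 4 → m.contains (0, l) = true

def pvMono (m m' : PySem.Dict (Int × Int) Int) : Prop :=
  ∀ k : Int × Int, m.contains k = true → m'.contains k = true

-- A's inner accumulation loop equals the max(0, max(filtered list)) form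
theorem pvInner (g : Int → Int) (row : List Int) (last : Int) :
    (PySem.List.pyRange 0 3 1).foldl
      (fun maxi i => if i ≠ last then max maxi (pvAt row i + g i) else maxi) 0
    = max 0 (pvMax (((PySem.List.pyRange 0 3 1).filter (fun i => i != last)).map
        (fun i => pvAt row i + g i))) := by
  have h3 : PySem.List.pyRange 0 3 1 = [0, 1, 2] := by decide
  rw [h3]
  by_cases h0 : (0 : Int) = last <;> by_cases h1 : (1 : Int) = last <;>
    by_cases h2 : (2 : Int) = last <;>
    simp [List.foldl, h0, h1, h2, pvMax, PySem.List.max?_id_cons, bne_iff_ne, Ne.symm] <;>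
    omega

-- one A-step from the pvF values of day d produces the pvF values of day d+1
theorem pvAstep_F (arr : List (List Int)) (d : Nat) (row : List Int)
    (hrow : row = PySem.List.pyGetD arr ((d : Int) + 1) []) :
    pvAstep [pvF arr d 0, pvF arr d 1, pvF arr d 2, pvF arr d 3] row
      = [pvF arr (d+1) 0, pvF arr (d+1) 1, pvF arr (d+1) 2, pvF arr (d+1) 3] := by
  have hmap : ∀ last : Int,
      (((PySem.List.pyRange 0 3 1).filter (fun i => i != last)).map
        (fun i => pvAt row i +
          PySem.List.pyGetD [pvF arr d 0, pvF arr d 1, pvF arr d 2, pvF arr d 3] i 0))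
      = (((PySem.List.pyRange 0 3 1).filter (fun i => i != last)).map
        (fun i => pvAt row i + pvF arr d i)) := by
    intro last
    apply List.map_congr_left
    intro i hi
    have hi' : i ∈ [(0 : Int), 1, 2] := by
      have := (List.mem_filter.mp hi).1
      simpa [show PySem.List.pyRange 0 3 1 = [(0 : Int), 1, 2] from by decide] using this
    have hcase : i = 0 ∨ i = 1 ∨ i = 2 := by simpa using hi'
    rcases hcase with rfl | rfl | rfl <;>
      simp [PySem.List.pyGetD, PySem.List.pyGet?, PySem.List.pyIdx?]
  simp only [pvAstep, pvInner, hmap]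
  simp [show PySem.List.pyRange 0 4 1 = [(0 : Int), 1, 2, 3] from by decide, List.foldl,
    PySem.List.pySetD, PySem.List.pySet?, PySem.List.pyIdx?, pvF, hrow]

-- A's day loop computes the pvF values
theorem pvA_days (arr : List (List Int)) (d : Nat) :
    (PySem.List.pyRange 1 ((d : Int) + 1) 1).foldl
        (fun prev index => pvAstep prev (PySem.List.pyGetD arr index []))
        [pvBase arr 0, pvBase arr 1, pvBase arr 2, pvBase arr 3]
      = [pvF arr d 0, pvF arr d 1, pvF arr d 2, pvF arr d 3] := by
  induction d with
  | zero =>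
    rw [show ((0 : Nat) : Int) + 1 = 1 from by norm_num,
      show PySem.List.pyRange 1 1 1 = [] from by decide]
    rfl
  | succ d ih =>
    have hr : PySem.List.pyRange 1 ((d : Int) + 1 + 1) 1
        = PySem.List.pyRange 1 ((d : Int) + 1) 1 ++ [(d : Int) + 1] := by
      rw [PySem.List.pyRange_one_succ_right] <;> omega
    push_cast
    rw [hr, List.foldl_append, ih]
    simp only [List.foldl]
    rw [pvAstep_F arr d _ rfl]

-- unfolding equations of the while loop
theorem pvLoop_empty (arr : List (List Int)) (fuel : Nat) (m : PySem.Dict (Int × Int) Int) :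
    pvLoop arr fuel [] m = m := by cases fuel <;> rfl

theorem pvLoop_cons (arr : List (List Int)) (fuel : Nat) (day last : Int)
    (rest : List (Int × Int)) (m : PySem.Dict (Int × Int) Int) :
    pvLoop arr (fuel + 1) ((day, last) :: rest) m =
      if m.contains (day, last) then pvLoop arr fuel rest m
      else
        if (pvPending m day last).isEmpty = false then
          pvLoop arr fuel ((pvPending m day last).reverse ++ (day, last) :: rest) m
        else
          pvLoop arr fuel rest (m.insert (day, last) (pvValue arr m day last)) := rfl

-- the dict comprehension written out
theorem pvSeed_eq (arr : List (List Int)) :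
    pvSeed arr = ((((PySem.Dict.empty.insert ((0 : Int), (0 : Int)) (pvBase arr 0)).insert
      (0, 1) (pvBase arr 1)).insert (0, 2) (pvBase arr 2)).insert (0, 3) (pvBase arr 3)) := by
  simp [pvSeed, show PySem.List.pyRange 0 4 1 = [(0 : Int), 1, 2, 3] from by decide, List.foldl]

-- the seeded memo is correct and complete for day 0
theorem pvSeed_good (arr : List (List Int)) (h : arr.length ≠ 0) : pvGood arr (pvSeed arr) := by
  intro d l v hget
  rw [pvSeed_eq] at hget
  simp only [PySem.Dict.get?_insert, PySem.Dict.get?_empty] at hget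
  split_ifs at hget with h1 h2 h3 h4 <;>
    first
    | (injection h1 with hd hl; subst hd; subst hl
       injection hget with hv
       exact ⟨0, rfl, Nat.pos_of_ne_zero h, by rw [← hv]; rfl⟩)
    | (injection h2 with hd hl; subst hd; subst hl
       injection hget with hv
       exact ⟨0, rfl, Nat.pos_of_ne_zero h, by rw [← hv]; rfl⟩)
    | (injection h3 with hd hl; subst hd; subst hl
       injection hget with hv
       exact ⟨0, rfl, Nat.pos_of_ne_zero h, by rw [← hv]; rfl⟩)
    | (injection h4 with hd hl; subst hd; subst hl
       injection hget with hv
       exact ⟨0, rfl, Nat.pos_of_ne_zero h, by rw [← hv]; rfl⟩)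

theorem pvSeed_seeded (arr : List (List Int)) : pvSeeded (pvSeed arr) := by
  intro l h0 h4
  have : l = 0 ∨ l = 1 ∨ l = 2 ∨ l = 3 := by omega
  rw [pvSeed_eq]
  rcases this with rfl | rfl | rfl | rfl <;> simp [PySem.Dict.contains_insert]

-- processing a block of same-day states in sequence (the reversed pending block)
theorem pvChain (arr : List (List Int)) (d : Nat)
    (IH : ∀ (l : Int) (rest : List (Int × Int)) (m : PySem.Dict (Int × Int) Int),
      pvGood arr m → pvSeeded m → d < arr.length → 0 ≤ l → l < 4 →
      ∃ (k : Nat) (m' : PySem.Dict (Int × Int) Int),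
        k ≤ 5 ^ (d + 1) ∧
        (∀ fuel : Nat, pvLoop arr (k + fuel) (((d : Int), l) :: rest) m = pvLoop arr fuel rest m') ∧
        pvGood arr m' ∧ pvMono m m' ∧ m'.contains ((d : Int), l) = true ∧
        (∀ key : Int × Int, m'.contains key = true → m.contains key = true ∨ key.1 ≤ (d : Int))) :
    ∀ (is : List Int) (rest : List (Int × Int)) (m : PySem.Dict (Int × Int) Int),
      (∀ i ∈ is, 0 ≤ i ∧ i < 4) → pvGood arr m → pvSeeded m → d < arr.length →
      ∃ (k : Nat) (m' : PySem.Dict (Int × Int) Int),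
        k ≤ is.length * 5 ^ (d + 1) ∧
        (∀ fuel : Nat,
          pvLoop arr (k + fuel) (is.map (fun i => ((d : Int), i)) ++ rest) m = pvLoop arr fuel rest m') ∧
        pvGood arr m' ∧ pvMono m m' ∧ (∀ i ∈ is, m'.contains ((d : Int), i) = true) ∧
        (∀ key : Int × Int, m'.contains key = true → m.contains key = true ∨ key.1 ≤ (d : Int)) := by
  intro is
  induction is with
  | nil =>
    intro rest m _ hg _ _
    exact ⟨0, m, by simp, fun fuel => by simp, hg, fun k hk => hk, by simp,
      fun key hk => Or.inl hk⟩
  | cons i is ihc =>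
    intro rest m hmem hg hs hd
    obtain ⟨k1, m1, hk1, hrun1, hg1, hmono1, hc1, hnew1⟩ :=
      IH i (is.map (fun i => ((d : Int), i)) ++ rest) m hg hs hd (hmem i (by simp)).1
        (hmem i (by simp)).2
    have hs1 : pvSeeded m1 := fun l h0 h4 => hmono1 _ (hs l h0 h4)
    obtain ⟨k2, m2, hk2, hrun2, hg2, hmono2, hc2, hnew2⟩ :=
      ihc rest m1 (fun j hj => hmem j (by simp [hj])) hg1 hs1 hd
    refine ⟨k1 + k2, m2, ?_, ?_, hg2, fun key hk => hmono2 _ (hmono1 _ hk), ?_, ?_⟩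
    · have : (i :: is).length * 5 ^ (d + 1) = 5 ^ (d + 1) + is.length * 5 ^ (d + 1) := by
        simp [Nat.succ_mul]; ring
      omega
    · intro fuel
      have e1 : k1 + k2 + fuel = k1 + (k2 + fuel) := by omega
      rw [e1]
      have := hrun1 (k2 + fuel)
      simpa [this] using hrun2 fuel
    · intro j hj
      rcases List.mem_cons.mp hj with rfl | hj
      · exact hmono2 _ hc1
      · exact hc2 j hj
    · intro key hk
      rcases hnew2 key hk with hk1' | hle
      · rcases hnew1 key hk1' with h | h
        · exact Or.inl h
        · exact Or.inr h
      · exact Or.inr hle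

-- once every needed child is memoized, the memoized value for day d+1 is pvF (d+1)
theorem pvValue_F (arr : List (List Int)) (d : Nat) (l : Int)
    (m : PySem.Dict (Int × Int) Int) (hg : pvGood arr m)
    (hall : ∀ i : Int, i ∈ [(0 : Int), 1, 2] → i ≠ l → m.contains ((d : Int), i) = true) :
    pvValue arr m ((d : Int) + 1) l = pvF arr (d + 1) l := by
  rw [show pvF arr (d + 1) l = max 0 (pvMax (((PySem.List.pyRange 0 3 1).filter
      (fun i => i != l)).map
      (fun i => pvAt (PySem.List.pyGetD arr ((d : Int) + 1) []) i + pvF arr d i))) from rfl]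
  unfold pvValue
  have h1 : ((d : Int) + 1) - 1 = (d : Int) := by ring
  rw [h1]
  congr 2
  apply List.map_congr_left
  intro i hi
  have himem : i ∈ [(0 : Int), 1, 2] := by
    have := (List.mem_filter.mp hi).1
    simpa [show PySem.List.pyRange 0 3 1 = [(0 : Int), 1, 2] from by decide] using this
  have hine : i ≠ l := by
    have := (List.mem_filter.mp hi).2
    simpa using this
  have hc := hall i himem hine
  rw [PySem.Dict.contains_eq_isSome_get?] at hc
  obtain ⟨v, hv⟩ := Option.isSome_iff_exists.mp hc
  obtain ⟨dn, hdn, _, hvF⟩ := hg _ _ _ hv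
  have hdd : dn = d := by exact_mod_cast hdn.symm
  rw [PySem.Dict.getD_eq_get?_getD, hv, Option.getD_some, hvF, hdd]

-- the DFS loop fully processes the head state within 5^(day+1) iterations, leaving a
-- correct memo that contains it, and touches no state above its day
theorem pvProcess (arr : List (List Int)) (dn : Nat) :
    ∀ (l : Int) (rest : List (Int × Int)) (m : PySem.Dict (Int × Int) Int),
      pvGood arr m → pvSeeded m → dn < arr.length → 0 ≤ l → l < 4 →
      ∃ (k : Nat) (m' : PySem.Dict (Int × Int) Int),
        k ≤ 5 ^ (dn + 1) ∧
        (∀ fuel : Nat, pvLoop arr (k + fuel) (((dn : Int), l) :: rest) m = pvLoop arr fuel rest m') ∧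
        pvGood arr m' ∧ pvMono m m' ∧ m'.contains ((dn : Int), l) = true ∧
        (∀ key : Int × Int, m'.contains key = true → m.contains key = true ∨ key.1 ≤ (dn : Int)) := by
  induction dn with
  | zero =>
    intro l rest m hg hs _ h0 h4
    refine ⟨1, m, by norm_num, ?_, hg, fun k hk => hk, by simpa using hs l h0 h4,
      fun key hk => Or.inl hk⟩
    intro fuel
    rw [show 1 + fuel = fuel + 1 from by omega, pvLoop_cons]
    simp [hs l h0 h4]
  | succ d ih =>
    intro l rest m hg hs hlen h0 h4
    push_cast
    by_cases hc : m.contains ((d : Int) + 1, l) = true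
    · refine ⟨1, m, Nat.one_le_pow _ _ (by norm_num), ?_, hg, fun k hk => hk, hc,
        fun key hk => Or.inl hk⟩
      intro fuel
      rw [show 1 + fuel = fuel + 1 from by omega, pvLoop_cons]
      simp [hc]
    · have hlen' : d < arr.length := by omega
      have hpend : pvPending m ((d : Int) + 1) l
          = ((PySem.List.pyRange 0 3 1).filter
              (fun i => i != l && !(m.contains ((d : Int), i)))).map
            (fun i => ((d : Int), i)) := by
        simp [pvPending, add_sub_cancel_right]
      set is0 : List Int := (PySem.List.pyRange 0 3 1).filter
        (fun i => i != l && !(m.contains ((d : Int), i))) with his0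
      by_cases hpe : is0 = []
      · -- every child already memoized: one step memoizes the head
        have hall : ∀ i : Int, i ∈ [(0 : Int), 1, 2] → i ≠ l →
            m.contains ((d : Int), i) = true := by
          intro i hi hine
          have := List.filter_eq_nil_iff.mp hpe i
            (by simpa [show PySem.List.pyRange 0 3 1 = [(0 : Int), 1, 2] from by decide] using hi)
          simpa [hine] using this
        refine ⟨1, m.insert ((d : Int) + 1, l) (pvValue arr m ((d : Int) + 1) l),
          Nat.one_le_pow _ _ (by norm_num), ?_, ?_, ?_, ?_, ?_⟩
        · intro fuel
          rw [show 1 + fuel = fuel + 1 from by omega, pvLoop_cons]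
          simp [hc, hpend, hpe]
        · intro d' l' v hget
          rw [PySem.Dict.get?_insert] at hget
          split_ifs at hget with hk
          · injection hk with hk1 hk2
            injection hget with hv
            exact ⟨d + 1, by rw [hk1]; push_cast; ring, hlen,
              by rw [← hv, hk2, pvValue_F arr d l m hg hall]⟩
          · exact hg _ _ _ hget
        · intro key hk
          simp [PySem.Dict.contains_insert, hk]
        · simp
        · intro key hk
          simp only [PySem.Dict.contains_insert, Bool.or_eq_true, beq_iff_eq] at hk
          rcases hk with rfl | hk
          · exact Or.inr (by simp)
          · exact Or.inl hk
      · -- expand: process the pending children, then memoize the head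
        obtain ⟨k2, m2, hk2, hrun2, hg2, hmono2, hc2, hnew2⟩ :=
          pvChain arr d ih is0.reverse (((d : Int) + 1, l) :: rest) m
            (by
              intro i hi
              have h1 := (List.mem_filter.mp (List.mem_reverse.mp hi)).1
              have h2 : i = 0 ∨ i = 1 ∨ i = 2 := by
                rw [show PySem.List.pyRange 0 3 1 = [(0 : Int), 1, 2] from by decide] at h1
                simpa using h1
              exact ⟨by omega, by omega⟩)
            hg hs hlen'
        have hcm2 : m2.contains ((d : Int) + 1, l) = false := by
          cases h : m2.contains ((d : Int) + 1, l)
          · rfl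
          · exfalso
            rcases hnew2 _ h with h' | h'
            · exact hc h'
            · simp at h'
        have hall2 : ∀ i : Int, i ∈ [(0 : Int), 1, 2] → i ≠ l →
            m2.contains ((d : Int), i) = true := by
          intro i hi hine
          by_cases hcm : m.contains ((d : Int), i) = true
          · exact hmono2 _ hcm
          · refine hc2 i (List.mem_reverse.mpr ?_)
            rw [his0]
            refine List.mem_filter.mpr ⟨?_, ?_⟩
            · simpa [show PySem.List.pyRange 0 3 1 = [(0 : Int), 1, 2] from by decide] using hi
            · simp [hine, hcm]
        have hp2 : pvPending m2 ((d : Int) + 1) l = [] := by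
          rw [show pvPending m2 ((d : Int) + 1) l
              = ((PySem.List.pyRange 0 3 1).filter
                  (fun i => i != l && !(m2.contains ((d : Int), i)))).map
                (fun i => ((d : Int), i)) from by simp [pvPending, add_sub_cancel_right]]
          rw [List.filter_eq_nil_iff.mpr, List.map_nil]
          intro i hi
          by_cases hine : i = l
          · simp [hine]
          · have : i ∈ [(0 : Int), 1, 2] := by
              simpa [show PySem.List.pyRange 0 3 1 = [(0 : Int), 1, 2] from by decide] using hi
            simp [hall2 i this hine]
        refine ⟨k2 + 2, m2.insert ((d : Int) + 1, l) (pvValue arr m2 ((d : Int) + 1) l),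
          ?_, ?_, ?_, ?_, ?_, ?_⟩
        · have hlef : is0.length ≤ 3 := by
            calc is0.length ≤ (PySem.List.pyRange 0 3 1).length := by
                  rw [his0]; exact List.length_filter_le _ _
              _ = 3 := by decide
          have hk2' : k2 ≤ 3 * 5 ^ (d + 1) := by
            calc k2 ≤ is0.reverse.length * 5 ^ (d + 1) := hk2
              _ ≤ 3 * 5 ^ (d + 1) := by
                  apply Nat.mul_le_mul_right
                  simpa using hlef
          have hpow : 5 ^ (d + 1 + 1) = 5 * 5 ^ (d + 1) := by ring
          have hone : 1 ≤ 5 ^ (d + 1) := Nat.one_le_pow _ _ (by norm_num)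
          omega
        · intro fuel
          rw [show k2 + 2 + fuel = (k2 + (1 + fuel)) + 1 from by omega, pvLoop_cons]
          rw [if_neg (by simp [hc])]
          rw [if_pos (by simp [hpend, hpe])]
          rw [hpend, ← List.map_reverse]
          rw [hrun2 (1 + fuel)]
          rw [show 1 + fuel = fuel + 1 from by omega, pvLoop_cons]
          rw [if_neg (by simp [hcm2])]
          rw [if_neg (by simp [hp2])]
        · intro d' l' v hget
          rw [PySem.Dict.get?_insert] at hget
          split_ifs at hget with hk
          · injection hk with hk1 hk2
            injection hget with hv
            exact ⟨d + 1, by rw [hk1]; push_cast; ring, hlen,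
              by rw [← hv, hk2, pvValue_F arr d l m2 hg2 hall2]⟩
          · exact hg2 _ _ _ hget
        · intro key hk
          simp [PySem.Dict.contains_insert, hmono2 _ hk]
        · simp
        · intro key hk
          simp only [PySem.Dict.contains_insert, Bool.or_eq_true, beq_iff_eq] at hk
          rcases hk with rfl | hk
          · exact Or.inr (by simp)
          · rcases hnew2 key hk with h | h
            · exact Or.inl h
            · exact Or.inr (by omega)

-- the four assignments prev[0..3] = … on [-1,-1,-1,-1] produce the plain list
theorem pvInit_eq (w x y z : Int) :
    PySem.List.pySetD (PySem.List.pySetD (PySem.List.pySetD (PySem.List.pySetD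
      [-1, -1, -1, -1] 0 w) 1 x) 2 y) 3 z = [w, x, y, z] := by
  simp [PySem.List.pySetD, PySem.List.pySet?, PySem.List.pyIdx?]

-- ===== VERDICT (by name: the statement is the Claim_ definition above) =====
theorem maximumPoints_tabuSapceOpt_spec : Claim_equal_maximumPoints_tabuSapceOpt := by
  intro arr _ hpre
  obtain ⟨hne, -⟩ := hpre
  have hL : 1 ≤ arr.length := by
    cases arr with
    | nil => exact absurd rfl hne
    | cons a l => simp
  have hb0 : pvBase arr 0
      = max (pvAt (PySem.List.pyGetD arr 0 []) 1) (pvAt (PySem.List.pyGetD arr 0 []) 2) := by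
    simp [pvBase, pvMax, show PySem.List.pyRange 0 3 1 = [(0 : Int), 1, 2] from by decide,
      PySem.List.max?_id_cons]
  have hb1 : pvBase arr 1
      = max (pvAt (PySem.List.pyGetD arr 0 []) 0) (pvAt (PySem.List.pyGetD arr 0 []) 2) := by
    simp [pvBase, pvMax, show PySem.List.pyRange 0 3 1 = [(0 : Int), 1, 2] from by decide,
      PySem.List.max?_id_cons]
  have hb2 : pvBase arr 2
      = max (pvAt (PySem.List.pyGetD arr 0 []) 0) (pvAt (PySem.List.pyGetD arr 0 []) 1) := by
    simp [pvBase, pvMax, show PySem.List.pyRange 0 3 1 = [(0 : Int), 1, 2] from by decide,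
      PySem.List.max?_id_cons]
  have hb3 : pvBase arr 3
      = max (max (pvAt (PySem.List.pyGetD arr 0 []) 0) (pvAt (PySem.List.pyGetD arr 0 []) 1))
          (pvAt (PySem.List.pyGetD arr 0 []) 2) := by
    simp [pvBase, pvMax, show PySem.List.pyRange 0 3 1 = [(0 : Int), 1, 2] from by decide,
      PySem.List.max?_id_cons]
  have hlen : PySem.List.len arr = ((arr.length - 1 : Nat) : Int) + 1 := by
    rw [PySem.List.len_eq]; omega
  have hA : maximumPoints_tabuSapceOpt arr = pvF arr (arr.length - 1) 3 := by
    simp only [maximumPoints_tabuSapceOpt]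
    rw [pvInit_eq, ← hb3, ← hb2, ← hb1, ← hb0, hlen, pvA_days arr (arr.length - 1)]
    simp [PySem.List.pyGetD, PySem.List.pyGet?, PySem.List.pyIdx?]
  have hB : maximumPoints_tabuSapceOpt_alt arr = pvF arr (arr.length - 1) 3 := by
    simp only [maximumPoints_tabuSapceOpt_alt]
    have hkey : PySem.List.len arr - 1 = ((arr.length - 1 : Nat) : Int) := by
      rw [PySem.List.len_eq]; omega
    rw [hkey]
    obtain ⟨k, m', hk, hrun, hg, -, hcont, -⟩ :=
      pvProcess arr (arr.length - 1) 3 [] (pvSeed arr) (pvSeed_good arr (by omega))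
        (pvSeed_seeded arr) (by omega) (by norm_num) (by norm_num)
    have hkle : k ≤ 5 ^ (arr.length + 1) :=
      le_trans hk (Nat.pow_le_pow_right (by norm_num) (by omega))
    rw [show 5 ^ (arr.length + 1) = k + (5 ^ (arr.length + 1) - k) from by omega,
      hrun, pvLoop_empty]
    rw [PySem.Dict.contains_eq_isSome_get?] at hcont
    obtain ⟨v, hv⟩ := Option.isSome_iff_exists.mp hcont
    obtain ⟨dn, hdn, -, hvF⟩ := hg _ _ _ hv
    have hdd : dn = arr.length - 1 := by exact_mod_cast hdn.symm
    rw [PySem.Dict.getD_eq_get?_getD, hv, Option.getD_some, hvF, hdd]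
  unfold Spec_maximumPoints_tabuSapceOpt
  rw [hA, hB]
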